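-- pv_equiv track=rewrite | github.com/tdlib/td | test/analysis/build_family_lane_baselines.py | classify_family_id
-- ===== SOURCE A (Python) =====
-- _FIREFOX_TOKENS = ("firefox", "librewolf", "ironfox", "firefoxzen")
--
-- _SAFARI_TOKENS = ("safari",)
--
-- def classify_family_id(profile_id: str, os_family: str) -> str:
--     """Return the coarse family identifier used by the baseline table.
--
--     The classification mirrors the groupings we have asserted on in the
--     existing capture differential tests and the corpus invariance tests:
--     Safari and iOS-native browsers share the Apple TLS stack, every
--     Chromium-derived browser on desktop/Android shares the BoringSSL
--     stack, iOS Chrome/Brave also sits on top of Apple TLS, Firefox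
--     variants on desktop/Android use Gecko/NSS, Firefox on iOS is an
--     Apple-TLS skin.
--     """
--
--     normalized = profile_id.lower()
--
--     is_firefox_gecko = any(token in normalized for token in _FIREFOX_TOKENS)
--     is_safari = any(token in normalized for token in _SAFARI_TOKENS)
--
--     if is_safari:
--         if os_family == "ios":
--             return "apple_ios_tls"
--         if os_family == "macos":
--             return "apple_macos_tls"
--         return "apple_tls"
--
--     if is_firefox_gecko:
--         if os_family == "ios":
--             # Gecko is not available on iOS; the app must be a skin
--             # sitting on Apple TLS.
--             return "apple_ios_tls"
--         if os_family == "android":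
--             return "firefox_android"
--         if os_family == "macos":
--             return "firefox_macos"
--         if os_family == "linux":
--             return "firefox_linux_desktop"
--         if os_family == "windows":
--             return "firefox_windows"
--         return "firefox_other"
--
--     # Chromium-derived engines: chrome, chromium, edge, opera, vivaldi,
--     # brave, cromite, yandex, samsung_internet, adblock_browser, tdesktop,
--     # chromiummaxthon, ...
--     if os_family == "ios":
--         return "ios_chromium"
--     if os_family == "android":
--         return "android_chromium"
--     if os_family == "macos":
--         return "chromium_macos"
--     if os_family == "linux":
--         return "chromium_linux_desktop"
--     if os_family == "windows":
--         return "chromium_windows"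
--     return "chromium_other"
-- ===== SOURCE B (Python) =====
-- _FIREFOX_TOKENS = ("firefox", "librewolf", "ironfox", "firefoxzen")
-- _SAFARI_TOKENS = ("safari",)
--
-- # An ordered decision list: each rule is (engine_tokens_or_None, os_or_None, result).
-- # A rule matches when (no token requirement, or some token occurs in the lowered id)
-- # and (no os requirement, or the os equals it).  The first matching rule wins;
-- # Safari rules precede Firefox rules, and each engine block ends with an os
-- # wildcard, so later blocks are only reached when that engine did not match.
-- _RULES = (
--     (_SAFARI_TOKENS, "ios", "apple_ios_tls"),
--     (_SAFARI_TOKENS, "macos", "apple_macos_tls"),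
--     (_SAFARI_TOKENS, None, "apple_tls"),
--     (_FIREFOX_TOKENS, "ios", "apple_ios_tls"),
--     (_FIREFOX_TOKENS, "android", "firefox_android"),
--     (_FIREFOX_TOKENS, "macos", "firefox_macos"),
--     (_FIREFOX_TOKENS, "linux", "firefox_linux_desktop"),
--     (_FIREFOX_TOKENS, "windows", "firefox_windows"),
--     (_FIREFOX_TOKENS, None, "firefox_other"),
--     (None, "ios", "ios_chromium"),
--     (None, "android", "android_chromium"),
--     (None, "macos", "chromium_macos"),
--     (None, "linux", "chromium_linux_desktop"),
--     (None, "windows", "chromium_windows"),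
-- )
--
-- def classify_family_id(profile_id: str, os_family: str) -> str:
--     normalized = profile_id.lower()
--     for tokens, required_os, result in _RULES:
--         if tokens is not None and not any(t in normalized for t in tokens):
--             continue
--         if required_os is not None and required_os != os_family:
--             continue
--         return result
--     return "chromium_other"
-- ===== Notes on version B (the rewrite author's own statement) =====
-- stated objective: alternative
-- what changed: Replaces the three nested if-chains by a single ordered decision list of (tokens, os, result) rules with wildcard fields, evaluated by one first-match linear scan.
import Mathlib
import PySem

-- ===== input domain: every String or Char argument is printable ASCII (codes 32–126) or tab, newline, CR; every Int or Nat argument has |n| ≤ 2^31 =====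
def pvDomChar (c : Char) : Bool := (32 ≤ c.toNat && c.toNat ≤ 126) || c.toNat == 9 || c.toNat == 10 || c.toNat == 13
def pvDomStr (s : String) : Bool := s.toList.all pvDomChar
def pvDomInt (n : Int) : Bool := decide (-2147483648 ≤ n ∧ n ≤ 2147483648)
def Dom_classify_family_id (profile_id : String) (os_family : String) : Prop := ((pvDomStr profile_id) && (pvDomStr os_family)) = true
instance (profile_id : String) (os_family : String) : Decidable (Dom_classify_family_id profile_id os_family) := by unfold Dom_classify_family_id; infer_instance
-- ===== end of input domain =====

-- B replaces A's three nested if-chains by a first-match scan over one ordered decision list of wildcard rules (objective: alternative).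

-- ===== PORT A =====
def pvFirefoxTokens : List String := ["firefox", "librewolf", "ironfox", "firefoxzen"]
def pvSafariTokens : List String := ["safari"]

def classify_family_id (profile_id : String) (os_family : String) : String :=
  let normalized := PySem.Str.lower profile_id
  let is_firefox_gecko := pvFirefoxTokens.any (fun token => PySem.Str.isIn token normalized)
  let is_safari := pvSafariTokens.any (fun token => PySem.Str.isIn token normalized)
  if is_safari then
    if os_family = "ios" then "apple_ios_tls"
    else if os_family = "macos" then "apple_macos_tls"
    else "apple_tls"
  else if is_firefox_gecko then
    if os_family = "ios" then "apple_ios_tls"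
    else if os_family = "android" then "firefox_android"
    else if os_family = "macos" then "firefox_macos"
    else if os_family = "linux" then "firefox_linux_desktop"
    else if os_family = "windows" then "firefox_windows"
    else "firefox_other"
  else
    if os_family = "ios" then "ios_chromium"
    else if os_family = "android" then "android_chromium"
    else if os_family = "macos" then "chromium_macos"
    else if os_family = "linux" then "chromium_linux_desktop"
    else if os_family = "windows" then "chromium_windows"
    else "chromium_other"

-- ===== PORT B =====
-- the ordered decision list of Source B: (engine tokens or wildcard, os or wildcard, result)
def pvRules : List (Option (List String) × Option String × String) :=
  [ (some pvSafariTokens, some "ios", "apple_ios_tls"),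
    (some pvSafariTokens, some "macos", "apple_macos_tls"),
    (some pvSafariTokens, none, "apple_tls"),
    (some pvFirefoxTokens, some "ios", "apple_ios_tls"),
    (some pvFirefoxTokens, some "android", "firefox_android"),
    (some pvFirefoxTokens, some "macos", "firefox_macos"),
    (some pvFirefoxTokens, some "linux", "firefox_linux_desktop"),
    (some pvFirefoxTokens, some "windows", "firefox_windows"),
    (some pvFirefoxTokens, none, "firefox_other"),
    (none, some "ios", "ios_chromium"),
    (none, some "android", "android_chromium"),
    (none, some "macos", "chromium_macos"),
    (none, some "linux", "chromium_linux_desktop"),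
    (none, some "windows", "chromium_windows") ]

-- the for-loop of Source B: first matching rule wins, post-loop fallback "chromium_other"
def pvScan (normalized : String) (os_family : String) : List (Option (List String) × Option String × String) → String
  | [] => "chromium_other"
  | (tokens, required_os, result) :: rest =>
    if (match tokens with
        | none => true
        | some ts => ts.any (fun t => PySem.Str.isIn t normalized)) = false then
      pvScan normalized os_family rest
    else if (match required_os with
        | none => true
        | some o => o == os_family) = false then
      pvScan normalized os_family rest
    else result

def classify_family_id_alt (profile_id : String) (os_family : String) : String :=
  pvScan (PySem.Str.lower profile_id) os_family pvRules

-- ===== PRECONDITION & SPEC =====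
def Spec_classify_family_id (profile_id : String) (os_family : String) (out : String) : Prop := out = classify_family_id_alt profile_id os_family
instance (profile_id : String) (os_family : String) (out : String) : Decidable (Spec_classify_family_id profile_id os_family out) := by unfold Spec_classify_family_id; infer_instance

-- ===== CLAIM =====
def Claim_equal_classify_family_id : Prop := ∀ (profile_id : String) (os_family : String), Dom_classify_family_id profile_id os_family → Spec_classify_family_id profile_id os_family (classify_family_id profile_id os_family)

-- ===== LEMMAS AND PROOFS =====

-- ===== VERDICT =====
set_option maxHeartbeats 2000000 in
theorem classify_family_id_spec : Claim_equal_classify_family_id := by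
  intro profile_id os_family _
  unfold Spec_classify_family_id classify_family_id classify_family_id_alt
  set normalized := PySem.Str.lower profile_id with hn
  by_cases hs : pvSafariTokens.any (fun token => PySem.Str.isIn token normalized) = true <;>
  by_cases hf : pvFirefoxTokens.any (fun token => PySem.Str.isIn token normalized) = true <;>
  by_cases h1 : os_family = "ios" <;>
  by_cases h2 : os_family = "macos" <;>
  by_cases h3 : os_family = "android" <;>
  by_cases h4 : os_family = "linux" <;>
  by_cases h5 : os_family = "windows" <;>
  simp_all [pvRules, pvScan, Ne.symm]
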